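-- pv_equiv track=rewrite | github.com/nolenroyalty/one-million-checkboxes | test.py | find_longest_streaks
-- ===== SOURCE A (Python) =====
-- def find_longest_streaks(bitstring):
--     longest_0 = 0
--     longest_1 = 0
--     longest_0_idx = 0
--     longest_1_idx = 0
--     current_0 = 0
--     current_1 = 0
--     current_0_idx = 0
--     current_1_idx = 0
--
--     on_a_zero = True
--
--     for idx, bit in enumerate(bitstring):
--         if bit == '0':
--             if not on_a_zero:
--                 on_a_zero = True
--                 current_0_idx = idx
--
--             current_0 += 1
--             current_1 = 0
--             if current_0 > longest_0:
--                 longest_0 = current_0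
--                 longest_0_idx = current_0_idx
--         else:
--             if on_a_zero:
--                 on_a_zero = False
--                 current_1_idx = idx
--             current_1 += 1
--             current_0 = 0
--             if current_1 > longest_1:
--                 longest_1 = current_1
--                 longest_1_idx = current_1_idx
--     return [[longest_0, longest_0_idx], [longest_1, longest_1_idx]]
-- ===== SOURCE B (Python) =====
-- def find_longest_streaks(bitstring):
--     # Run-at-a-time scan: find each maximal run of equal key (c == '0') with a
--     # nested scan, record it if it beats the best run of its kind, then skip it.
--     longest_zero = (0, 0)
--     longest_one = (0, 0)
--     start = 0
--     rest = bitstring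
--     while rest:
--         is_zero = rest[0] == '0'
--         run = 1
--         while run < len(rest) and (rest[run] == '0') == is_zero:
--             run += 1
--         if is_zero:
--             if run > longest_zero[0]:
--                 longest_zero = (run, start)
--         else:
--             if run > longest_one[0]:
--                 longest_one = (run, start)
--         start += run
--         rest = rest[run:]
--     return [list(longest_zero), list(longest_one)]
-- ===== Notes on version B (the rewrite author's own statement) =====
-- stated objective: alternative
-- what changed: A is a single char-by-char pass juggling eight counters/flags; B decomposes the string into maximal runs (outer loop per run, inner scan finds the run length) and records a run only when it beats the best of its kind.
import Mathlib
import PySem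

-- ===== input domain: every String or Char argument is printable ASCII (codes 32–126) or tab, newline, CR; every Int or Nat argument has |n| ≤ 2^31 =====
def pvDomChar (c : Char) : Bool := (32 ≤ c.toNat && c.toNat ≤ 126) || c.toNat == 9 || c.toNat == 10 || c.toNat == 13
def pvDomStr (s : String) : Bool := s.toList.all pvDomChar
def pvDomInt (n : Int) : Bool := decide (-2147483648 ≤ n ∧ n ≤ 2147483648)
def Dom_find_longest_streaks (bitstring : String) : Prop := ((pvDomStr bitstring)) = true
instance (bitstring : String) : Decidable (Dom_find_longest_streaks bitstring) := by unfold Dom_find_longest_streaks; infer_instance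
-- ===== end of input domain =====

-- B replaces A's single char-by-char pass over eight counters/flags by a run-at-a-time
-- decomposition (outer loop per maximal run, inner scan for its length); same O(n) cost.

-- ===== PORT A =====
-- state: longest_0, longest_1, longest_0_idx, longest_1_idx, current_0, current_1,
-- current_0_idx, current_1_idx, on_a_zero
structure ASt where
  l0 : Int
  l1 : Int
  i0 : Int
  i1 : Int
  c0 : Int
  c1 : Int
  c0i : Int
  c1i : Int
  onZero : Bool
deriving Repr, DecidableEq

def astep (st : ASt) (idx : Int) (bit : Char) : ASt :=
  if bit = '0' then
    let st := if st.onZero = false then { st with onZero := true, c0i := idx } else st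
    let st := { st with c0 := st.c0 + 1, c1 := 0 }
    if st.c0 > st.l0 then { st with l0 := st.c0, i0 := st.c0i } else st
  else
    let st := if st.onZero = true then { st with onZero := false, c1i := idx } else st
    let st := { st with c1 := st.c1 + 1, c0 := 0 }
    if st.c1 > st.l1 then { st with l1 := st.c1, i1 := st.c1i } else st

-- the `for idx, bit in enumerate(bitstring)` loop
def aLoop (st : ASt) (idx : Int) : List Char → ASt
  | [] => st
  | c :: cs => aLoop (astep st idx c) (idx + 1) cs

def find_longest_streaks (bitstring : String) : List (List Int) :=
  let st := aLoop ⟨0, 0, 0, 0, 0, 0, 0, 0, true⟩ 0 bitstring.toList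
  [[st.l0, st.i0], [st.l1, st.i1]]

-- ===== PORT B =====
-- inner `while run < len(rest) and (rest[run] == '0') == is_zero: run += 1`
-- scanned from position 1 of rest: length of the maximal key-matching prefix
def countRun (key : Bool) : List Char → Nat
  | [] => 0
  | c :: cs => if (c == '0') = key then countRun key cs + 1 else 0

-- outer `while rest:` loop; bz = longest_zero, bo = longest_one
def bLoop (bz bo : Int × Int) (start : Int) : List Char → List (List Int)
  | [] => [[bz.1, bz.2], [bo.1, bo.2]]
  | c :: cs =>
    let isZero := c == '0'
    let run : Nat := 1 + countRun isZero cs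
    if isZero then
      let bz := if (run : Int) > bz.1 then ((run : Int), start) else bz
      bLoop bz bo (start + run) (cs.drop (run - 1))
    else
      let bo := if (run : Int) > bo.1 then ((run : Int), start) else bo
      bLoop bz bo (start + run) (cs.drop (run - 1))
  termination_by cs => cs.length
  decreasing_by all_goals simp

def find_longest_streaks_alt (bitstring : String) : List (List Int) :=
  bLoop (0, 0) (0, 0) 0 bitstring.toList

-- ===== PRECONDITION & SPEC =====
def Spec_find_longest_streaks (bitstring : String) (out : List (List Int)) : Prop := out = find_longest_streaks_alt bitstring
instance (bitstring : String) (out : List (List Int)) : Decidable (Spec_find_longest_streaks bitstring out) := by unfold Spec_find_longest_streaks; infer_instance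

-- ===== CLAIM (what is proved, stated in full; the proofs are below) =====
def Claim_equal_find_longest_streaks : Prop := ∀ (bitstring : String), Dom_find_longest_streaks bitstring → Spec_find_longest_streaks bitstring (find_longest_streaks bitstring)

-- ===== LEMMAS AND PROOFS =====

-- the A-state after absorbing k further chars of a zero-run (onZero already true)
def zAfter (st : ASt) (k : Nat) : ASt :=
  if k = 0 then st else
    { st with
        l0 := if st.c0 + k > st.l0 then st.c0 + k else st.l0
        i0 := if st.c0 + (k : Int) > st.l0 then st.c0i else st.i0
        c0 := st.c0 + k
        c1 := 0 }

-- the A-state after absorbing k further chars of a one-run (onZero already false)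
def oAfter (st : ASt) (k : Nat) : ASt :=
  if k = 0 then st else
    { st with
        l1 := if st.c1 + k > st.l1 then st.c1 + k else st.l1
        i1 := if st.c1 + (k : Int) > st.l1 then st.c1i else st.i1
        c1 := st.c1 + k
        c0 := 0 }

lemma astep_zero (st : ASt) (idx : Int) (h : st.onZero = true) :
    astep st idx '0' = zAfter st 1 := by
  simp only [astep, zAfter, h, if_pos, reduceIte]
  obtain ⟨l0, l1, i0, i1, c0, c1, c0i, c1i, oz⟩ := st
  simp only at h
  subst h
  simp only [Nat.cast_one]
  split_ifs with h1 h2 h2 <;> simp_all <;> omega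

lemma astep_one (st : ASt) (idx : Int) (c : Char) (h : st.onZero = false) (hc : ¬ c = '0') :
    astep st idx c = oAfter st 1 := by
  simp only [astep, oAfter, h, hc, if_pos, reduceIte, if_neg, Bool.false_eq_true]
  obtain ⟨l0, l1, i0, i1, c0, c1, c0i, c1i, oz⟩ := st
  simp only at h
  subst h
  simp only [Nat.cast_one]
  split_ifs with h1 h2 h2 <;> simp_all <;> omega

lemma zAfter_zAfter (st : ASt) (k : Nat) : zAfter (zAfter st 1) k = zAfter st (k + 1) := by
  rcases Nat.eq_zero_or_pos k with hk | hk
  · subst hk; simp [zAfter]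
  · obtain ⟨l0, l1, i0, i1, c0, c1, c0i, c1i, oz⟩ := st
    unfold zAfter
    simp only [if_neg (by omega : ¬ k = 0), if_neg (by omega : ¬ (1 : Nat) = 0),
      if_neg (by omega : ¬ k + 1 = 0)]
    simp only [ASt.mk.injEq]
    push_cast
    split_ifs <;> simp_all <;> omega

lemma oAfter_oAfter (st : ASt) (k : Nat) : oAfter (oAfter st 1) k = oAfter st (k + 1) := by
  rcases Nat.eq_zero_or_pos k with hk | hk
  · subst hk; simp [oAfter]
  · obtain ⟨l0, l1, i0, i1, c0, c1, c0i, c1i, oz⟩ := st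
    unfold oAfter
    simp only [if_neg (by omega : ¬ k = 0), if_neg (by omega : ¬ (1 : Nat) = 0),
      if_neg (by omega : ¬ k + 1 = 0)]
    simp only [ASt.mk.injEq]
    push_cast
    split_ifs <;> simp_all <;> omega

lemma zAfter_onZero (st : ASt) (k : Nat) : (zAfter st k).onZero = st.onZero := by
  unfold zAfter; split_ifs <;> rfl

lemma oAfter_onZero (st : ASt) (k : Nat) : (oAfter st k).onZero = st.onZero := by
  unfold oAfter; split_ifs <;> rfl

-- absorbing the whole '0'-prefix of l in one go
lemma mid_zero (l : List Char) (idx : Int) (st : ASt) (h : st.onZero = true) :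
    aLoop st idx l
      = aLoop (zAfter st (countRun true l)) (idx + countRun true l)
          (l.drop (countRun true l)) := by
  induction l generalizing st idx with
  | nil => simp [countRun, zAfter]
  | cons c cs ih =>
    by_cases hc : c = '0'
    · subst hc
      have hcr : countRun true ('0' :: cs) = countRun true cs + 1 := by simp [countRun]
      rw [hcr]
      have h0 : aLoop st idx ('0' :: cs) = aLoop (astep st idx '0') (idx + 1) cs := rfl
      rw [h0, astep_zero st idx h,
        ih (idx + 1) (zAfter st 1) (by rw [zAfter_onZero]; exact h),
        zAfter_zAfter]
      have harith : idx + ((countRun true cs + 1 : Nat) : Int)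
          = idx + 1 + (countRun true cs : Int) := by push_cast; ring
      rw [List.drop_succ_cons, harith]
    · have hcr : countRun true (c :: cs) = 0 := by simp [countRun, hc]
      rw [hcr]; simp [zAfter]

lemma mid_one (l : List Char) (idx : Int) (st : ASt) (h : st.onZero = false) :
    aLoop st idx l
      = aLoop (oAfter st (countRun false l)) (idx + countRun false l)
          (l.drop (countRun false l)) := by
  induction l generalizing st idx with
  | nil => simp [countRun, oAfter]
  | cons c cs ih =>
    by_cases hc : c = '0'
    · subst hc
      have hcr : countRun false ('0' :: cs) = 0 := by simp [countRun]
      rw [hcr]; simp [oAfter]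
    · have hcr : countRun false (c :: cs) = countRun false cs + 1 := by
        simp [countRun, hc]
      rw [hcr]
      have h0 : aLoop st idx (c :: cs) = aLoop (astep st idx c) (idx + 1) cs := rfl
      rw [h0, astep_one st idx c h hc,
        ih (idx + 1) (oAfter st 1) (by rw [oAfter_onZero]; exact h),
        oAfter_oAfter]
      have harith : idx + ((countRun false cs + 1 : Nat) : Int)
          = idx + 1 + (countRun false cs : Int) := by push_cast; ring
      rw [List.drop_succ_cons, harith]

-- after dropping the counted prefix, the next char (if any) has the opposite key
lemma countRun_drop_head (key : Bool) (l : List Char) (d : Char)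
    (h : (l.drop (countRun key l)).head? = some d) : ¬ ((d == '0') = key) := by
  induction l with
  | nil => simp [countRun] at h
  | cons c cs ih =>
    by_cases hc : (c == '0') = key
    · rw [show countRun key (c :: cs) = countRun key cs + 1 by simp [countRun, hc]] at h
      exact ih h
    · rw [show countRun key (c :: cs) = 0 by simp [countRun, hc]] at h
      simp at h; subst h; exact hc

-- boundary invariant relating A's state to the start of the remaining input
def BRel (st : ASt) (start : Int) : List Char → Prop
  | [] => True
  | c :: _ =>
    if c = '0' then st.c0 = 0 ∧ (st.onZero = true → st.c0i = start)
    else st.c1 = 0 ∧ (st.onZero = false → st.c1i = start)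

lemma main_lemma (l : List Char) (start : Int) (st : ASt) (hrel : BRel st start l) :
    [[(aLoop st start l).l0, (aLoop st start l).i0],
     [(aLoop st start l).l1, (aLoop st start l).i1]]
      = bLoop (st.l0, st.i0) (st.l1, st.i1) start l := by
  induction hn : l.length using Nat.strong_induction_on generalizing l start st with
  | _ n ih =>
  match l with
  | [] => simp [aLoop, bLoop]
  | c :: cs =>
    by_cases hc : c = '0'
    · subst hc
      obtain ⟨hc0, hc0i⟩ : st.c0 = 0 ∧ (st.onZero = true → st.c0i = start) := by
        simpa [BRel] using hrel
      -- first char: A enters / continues a zero run with c0i = start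
      set st' : ASt := { st with onZero := true, c0i := start, c0 := 0 } with hst'
      have hstep : astep st start '0' = zAfter st' 1 := by
        rw [← astep_zero st' start rfl]
        cases honz : st.onZero with
        | true => simp [astep, hst', hc0, hc0i honz, honz]
        | false => simp [astep, hst', hc0, honz]
      set cnt := countRun true cs with hcnt
      have h1 : aLoop st start ('0' :: cs)
          = aLoop (zAfter st' (cnt + 1)) (start + 1 + cnt) (cs.drop cnt) := by
        show aLoop (astep st start '0') (start + 1) cs = _
        rw [hstep, mid_zero cs (start + 1) (zAfter st' 1) (by rw [zAfter_onZero]),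
          zAfter_zAfter]
      set st2 := zAfter st' (cnt + 1) with hst2
      have hst2e : st2 = { st with
          onZero := true
          c0i := start
          c0 := (cnt : Int) + 1
          c1 := 0
          l0 := if (cnt : Int) + 1 > st.l0 then (cnt : Int) + 1 else st.l0
          i0 := if (cnt : Int) + 1 > st.l0 then start else st.i0 } := by
        obtain ⟨l0, l1, i0, i1, c0, c1, c0i, c1i, oz⟩ := st
        rw [hst2, hst', zAfter]
        simp only [if_neg (by omega : ¬ cnt + 1 = 0)]
        simp only [ASt.mk.injEq]
        push_cast
        split_ifs <;> simp_all <;> omega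
      have hrel2 : BRel st2 (start + 1 + cnt) (cs.drop cnt) := by
        cases hnil : cs.drop cnt with
        | nil => simp [BRel]
        | cons a t =>
          have hd : (cs.drop cnt).head? = some a := by rw [hnil]; rfl
          have hkey := countRun_drop_head true cs a hd
          have hdne : ¬ a = '0' := by simpa using hkey
          simp [BRel, hdne, hst2e]
      have hlen : (cs.drop cnt).length < n := by
        simp at hn ⊢; omega
      have hihres := ih (cs.drop cnt).length hlen (cs.drop cnt) (start + 1 + cnt) st2 hrel2 rfl
      rw [h1, hihres, hst2e]
      -- one step of bLoop on the B side
      rw [bLoop]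
      simp only [beq_self_eq_true, if_pos, reduceIte, ← hcnt]
      have hrun : 1 + cnt = cnt + 1 := by omega
      have hcast : ((cnt + 1 : Nat) : Int) = (cnt : Int) + 1 := by push_cast; ring
      rw [hrun, hcast]
      have hstart : start + ((cnt : Int) + 1) = start + 1 + cnt := by ring
      have hdrop : cs.drop (cnt + 1 - 1) = cs.drop cnt := by simp
      rw [hstart, hdrop]
      by_cases hgt : (cnt : Int) + 1 > st.l0
      · simp [hgt]
      · simp [hgt]
    · obtain ⟨hc1, hc1i⟩ : st.c1 = 0 ∧ (st.onZero = false → st.c1i = start) := by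
        simpa [BRel, hc] using hrel
      set st' : ASt := { st with onZero := false, c1i := start, c1 := 0 } with hst'
      have hstep : astep st start c = oAfter st' 1 := by
        rw [← astep_one st' start c rfl hc]
        cases honz : st.onZero with
        | false => simp [astep, hst', hc1, hc1i honz, honz, hc]
        | true => simp [astep, hst', hc1, honz, hc]
      set cnt := countRun false cs with hcnt
      have h1 : aLoop st start (c :: cs)
          = aLoop (oAfter st' (cnt + 1)) (start + 1 + cnt) (cs.drop cnt) := by
        show aLoop (astep st start c) (start + 1) cs = _
        rw [hstep, mid_one cs (start + 1) (oAfter st' 1) (by rw [oAfter_onZero]),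
          oAfter_oAfter]
      set st2 := oAfter st' (cnt + 1) with hst2
      have hst2e : st2 = { st with
          onZero := false
          c1i := start
          c1 := (cnt : Int) + 1
          c0 := 0
          l1 := if (cnt : Int) + 1 > st.l1 then (cnt : Int) + 1 else st.l1
          i1 := if (cnt : Int) + 1 > st.l1 then start else st.i1 } := by
        obtain ⟨l0, l1, i0, i1, c0, c1, c0i, c1i, oz⟩ := st
        rw [hst2, hst', oAfter]
        simp only [if_neg (by omega : ¬ cnt + 1 = 0)]
        simp only [ASt.mk.injEq]
        push_cast
        split_ifs <;> simp_all <;> omega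
      have hrel2 : BRel st2 (start + 1 + cnt) (cs.drop cnt) := by
        cases hnil : cs.drop cnt with
        | nil => simp [BRel]
        | cons a t =>
          have hd : (cs.drop cnt).head? = some a := by rw [hnil]; rfl
          have hkey := countRun_drop_head false cs a hd
          have hdeq : a = '0' := by simpa using hkey
          simp [BRel, hdeq, hst2e]
      have hlen : (cs.drop cnt).length < n := by
        simp at hn ⊢; omega
      have hihres := ih (cs.drop cnt).length hlen (cs.drop cnt) (start + 1 + cnt) st2 hrel2 rfl
      rw [h1, hihres, hst2e]
      rw [bLoop]
      have hkeyb : (c == '0') = false := by simpa using hc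
      simp only [hkeyb, Bool.false_eq_true, reduceIte, ← hcnt]
      have hrun : 1 + cnt = cnt + 1 := by omega
      have hcast : ((cnt + 1 : Nat) : Int) = (cnt : Int) + 1 := by push_cast; ring
      rw [hrun, hcast]
      have hstart : start + ((cnt : Int) + 1) = start + 1 + cnt := by ring
      have hdrop : cs.drop (cnt + 1 - 1) = cs.drop cnt := by simp
      rw [hstart, hdrop]
      by_cases hgt : (cnt : Int) + 1 > st.l1
      · simp [hgt]
      · simp [hgt]

lemma rel_init (l : List Char) : BRel ⟨0, 0, 0, 0, 0, 0, 0, 0, true⟩ 0 l := by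
  cases l with
  | nil => trivial
  | cons c cs => by_cases hc : c = '0' <;> simp [BRel, hc]

-- ===== VERDICT (by name: the statement is the Claim_ definition above) =====
theorem find_longest_streaks_spec : Claim_equal_find_longest_streaks := by
  intro bitstring _
  show _ = _
  unfold find_longest_streaks find_longest_streaks_alt
  rw [main_lemma bitstring.toList 0 ⟨0, 0, 0, 0, 0, 0, 0, 0, true⟩ (rel_init _)]
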